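-- pv_equiv track=rewrite | github.com/ikeawesom/hash | run.py | insert_pwd
-- ===== SOURCE A (Python) =====
-- def modify(n):
--     s = ''
--     n = str(n)
--     index = 0
--     max_index = len(n) - 2
--     if len(n) % 2 == 1:
--         max_index -= 1
--     while index <= max_index:
--         num = (int(n[index:index+2])*int(n[index])) % 126
--         while num < 48:
--             num = num + 48
--         temp = chr(num)
--         if temp == '\n':
--             temp = chr((num + index + 1) % 126)
--         s += temp
--         index += 1
--     return s
--
-- def sum_ord(s):
--     n = 0
--     l = len(s)
--     for i in range(l):
--         n += ord(s[i])
--     return n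
--
-- def insert_pwd(s, pwd):
--     new = ''
--     index = 0
--     while len(s) > 0 and index < len(pwd):
--         if index % 2 == 0:
--             new += modify(sum_ord(s[0]))
--             s = s[1:]
--         new += pwd[index]
--         index += 1
--     return new
-- ===== SOURCE B (Python) =====
-- def modify(n):
--     s = ''
--     n = str(n)
--     index = 0
--     max_index = len(n) - 2
--     if len(n) % 2 == 1:
--         max_index -= 1
--     while index <= max_index:
--         num = (int(n[index:index+2])*int(n[index])) % 126
--         while num < 48:
--             num = num + 48
--         temp = chr(num)
--         if temp == '\n':
--             temp = chr((num + index + 1) % 126)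
--         s += temp
--         index += 1
--     return s
--
-- def sum_ord(s):
--     n = 0
--     l = len(s)
--     for i in range(l):
--         n += ord(s[i])
--     return n
--
-- def insert_pwd(s, pwd):
--     # closed-form step count: the original loop runs exactly min(2*len(s)-1, len(pwd)) steps
--     L = min(2 * len(s) - 1, len(pwd))
--     hashes = [modify(sum_ord(c)) for c in s]
--     out = []
--     for i in range(L):
--         if i % 2 == 0:
--             out.append(hashes[i // 2])
--         out.append(pwd[i])
--     return ''.join(out)
-- ===== Notes on version B (the rewrite author's own statement) =====
-- stated objective: faster
-- what changed: Replaces A's slice-shrinking while loop with its dual stop condition by computing the closed-form step count L = min(2*len(s)-1, len(pwd)) up front, precomputing the per-character hashes once, and building the output in one indexed pass over range(L) joined at the end.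
import Mathlib
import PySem

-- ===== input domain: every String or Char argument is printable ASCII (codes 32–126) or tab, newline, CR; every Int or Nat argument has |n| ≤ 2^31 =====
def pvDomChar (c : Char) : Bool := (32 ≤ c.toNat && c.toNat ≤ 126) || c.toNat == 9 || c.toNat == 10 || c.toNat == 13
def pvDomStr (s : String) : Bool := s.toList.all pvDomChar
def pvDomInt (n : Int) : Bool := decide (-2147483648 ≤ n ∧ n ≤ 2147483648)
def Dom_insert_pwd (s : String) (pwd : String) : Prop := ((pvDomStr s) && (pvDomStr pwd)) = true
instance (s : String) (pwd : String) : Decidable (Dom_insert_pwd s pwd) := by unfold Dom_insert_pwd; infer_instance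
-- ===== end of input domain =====

-- B replaces A's slice-shrinking dual-condition while loop (quadratic s = s[1:] copying) by the
-- closed-form step count L = min(2*len(s)-1, len(pwd)), a precomputed hash list and one indexed pass.

-- ===== PORT A =====

-- inner 'while num < 48: num = num + 48' of modify
def pvBump (num : Int) : Int :=
  if num < 48 then pvBump (num + 48) else num
termination_by (48 - num).toNat
decreasing_by omega

-- body of modify's outer while loop over index = 0..max_index (on List Char; str(n) is digits,
-- so the int() calls never raise; .getD 0 is unreachable there)
def pvModifyLoop (n : List Char) (maxIndex : Int) (index : Int) (acc : List Char) : List Char :=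
  if h : index ≤ maxIndex then
    let num := PySem.Int.mod (((PySem.Int.ofChars? (PySem.List.slice n (some index) (some (index + 2)))).getD 0)
                 * ((PySem.Int.ofChars? (((PySem.List.pyGet? n index).map ([·])).getD [])).getD 0)) 126
    let num := pvBump num
    let temp := Char.ofNat num.toNat
    let temp := if temp = '\n' then Char.ofNat (PySem.Int.mod (num + index + 1) 126).toNat else temp
    pvModifyLoop n maxIndex (index + 1) (acc ++ [temp])
  else acc
termination_by (maxIndex + 1 - index).toNat
decreasing_by omega

def pvModify (n : Int) : List Char :=
  let nc := PySem.Int.toChars n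
  let maxIndex : Int := (nc.length : Int) - 2
  let maxIndex := if PySem.Int.mod (nc.length : Int) 2 = 1 then maxIndex - 1 else maxIndex
  pvModifyLoop nc maxIndex 0 []

-- sum_ord: for i in range(len(s)): n += ord(s[i])   (index always in range; .getD 0 unreachable)
def pvSumOrd (s : List Char) : Int :=
  (PySem.List.pyRange 0 (s.length : Int) 1).foldl
    (fun n i => n + (((PySem.List.pyGet? s i).map (fun c => (c.toNat : Int))).getD 0)) 0

-- while len(s) > 0 and index < len(pwd): …
def pvInsertLoopA (sl : List Char) (pl : List Char) (index : Int) (acc : List Char) : List Char :=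
  if h : sl.length ≠ 0 ∧ index < (pl.length : Int) then
    let p := if PySem.Int.mod index 2 = 0 then
        (PySem.List.slice sl (some 1) none,
         acc ++ pvModify (pvSumOrd (((PySem.List.pyGet? sl 0).map ([·])).getD [])))
      else (sl, acc)
    pvInsertLoopA p.1 pl (index + 1) (p.2 ++ (((PySem.List.pyGet? pl index).map ([·])).getD []))
  else acc
termination_by ((pl.length : Int) - index).toNat
decreasing_by omega

def insert_pwd (s : String) (pwd : String) : String :=
  String.mk (pvInsertLoopA s.toList pwd.toList 0 [])

-- ===== PORT B =====
def insert_pwd_alt (s : String) (pwd : String) : String :=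
  let sl := s.toList
  let pl := pwd.toList
  let L : Int := min (2 * (sl.length : Int) - 1) (pl.length : Int)
  let hashes := sl.map (fun c => pvModify (pvSumOrd [c]))
  let out : List (List Char) :=
    (PySem.List.pyRange 0 L 1).foldl
      (fun acc i =>
        (if PySem.Int.mod i 2 = 0 then acc ++ [(PySem.List.pyGet? hashes (PySem.Int.floordiv i 2)).getD []] else acc)
          ++ [(((PySem.List.pyGet? pl i).map ([·])).getD [])]) []
  String.mk out.flatten

-- ===== PRECONDITION & SPEC =====
def Spec_insert_pwd (s : String) (pwd : String) (out : String) : Prop := out = insert_pwd_alt s pwd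
instance (s : String) (pwd : String) (out : String) : Decidable (Spec_insert_pwd s pwd out) := by unfold Spec_insert_pwd; infer_instance

-- ===== CLAIM (what is proved, stated in full; the proofs are below) =====
def Claim_equal_insert_pwd : Prop := ∀ (s : String) (pwd : String), Dom_insert_pwd s pwd → Spec_insert_pwd s pwd (insert_pwd s pwd)

-- ===== LEMMAS AND PROOFS =====

-- canonical form of the interleaving, indexed by a Nat position into pwd
def pvGo (sl : List Char) (pl : List Char) (k : Nat) : List Char :=
  if h : sl ≠ [] ∧ k < pl.length then
    if k % 2 = 0 then
      pvModify (pvSumOrd [sl.head h.1]) ++ pl[k] :: pvGo sl.tail pl (k + 1)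
    else pl[k] :: pvGo sl pl (k + 1)
  else []
termination_by pl.length - k

theorem pvMod2_eq (k : Nat) : PySem.Int.mod (k : Int) 2 = ((k % 2 : Nat) : Int) := by
  rw [PySem.Int.mod_eq_emod_of_pos (by omega : (0:Int) < 2)]
  omega

theorem pvDiv2_eq (k : Nat) : PySem.Int.floordiv (k : Int) 2 = ((k / 2 : Nat) : Int) := by
  rw [PySem.Int.floordiv_eq_ediv_of_pos (by omega : (0:Int) < 2)]
  omega

theorem loopA_aux (pl : List Char) (n : Nat) : ∀ (k : Nat) (sl acc : List Char),
    pl.length - k ≤ n → pvInsertLoopA sl pl (k : Int) acc = acc ++ pvGo sl pl k := by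
  induction n with
  | zero =>
    intro k sl acc hk
    rw [pvInsertLoopA, pvGo]
    rw [dif_neg (by push_cast; omega), dif_neg (by push_neg; intro _; omega)]
    simp
  | succ n ih =>
    intro k sl acc hk
    rw [pvInsertLoopA, pvGo]
    by_cases hc : sl ≠ [] ∧ k < pl.length
    · obtain ⟨hne, hklt⟩ := hc
      cases sl with
      | nil => exact absurd rfl hne
      | cons c st =>
        rw [dif_pos (by constructor <;> [simp; push_cast] <;> omega),
            dif_pos ⟨hne, hklt⟩]
        have hpg : (((PySem.List.pyGet? pl (k : Int)).map ([·])).getD []) = [pl[k]'hklt] := by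
          rw [PySem.List.pyGet?_natCast, List.getElem?_eq_getElem hklt]
          rfl
        by_cases hk2 : k % 2 = 0
        · rw [if_pos (by rw [pvMod2_eq, hk2]; rfl), if_pos hk2]
          simp only []
          rw [hpg]
          have h1 : PySem.List.slice (c :: st) (some 1) none = st := by
            rw [PySem.List.slice_from _ (by omega)]
            rfl
          have h0 : (((PySem.List.pyGet? (c :: st) (0 : Int)).map ([·])).getD []) = [c] := by
            simp [PySem.List.pyGet?, PySem.List.pyIdx?]
          rw [h1, h0]
          have hcast : (k : Int) + 1 = ((k + 1 : Nat) : Int) := by push_cast; ring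
          rw [hcast, ih (k + 1) st _ (by omega)]
          simp
        · rw [if_neg (by rw [pvMod2_eq]; omega), if_neg hk2]
          simp only []
          rw [hpg]
          have hcast : (k : Int) + 1 = ((k + 1 : Nat) : Int) := by push_cast; ring
          rw [hcast, ih (k + 1) (c :: st) _ (by omega)]
          simp
    · rw [dif_neg (by push_neg at hc ⊢; intro h1; have := hc (by intro h; subst h; simp at h1); push_cast; omega),
          dif_neg hc]
      simp

-- B's per-index contribution (the port's loop body as a flatMap function)
def pvF (sl pl : List Char) (i : Int) : List (List Char) :=
  (if PySem.Int.mod i 2 = 0 then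
      [(PySem.List.pyGet? (sl.map (fun c => pvModify (pvSumOrd [c]))) (PySem.Int.floordiv i 2)).getD []]
    else [])
    ++ [(((PySem.List.pyGet? pl i).map ([·])).getD [])]

theorem altB_aux (sl pl : List Char) (n : Nat) : ∀ k : Nat, pl.length - k ≤ n →
    (List.flatMap (pvF sl pl) (PySem.List.pyRange (k : Int) (min (2 * (sl.length : Int) - 1) (pl.length : Int)) 1)).flatten
      = pvGo (sl.drop ((k + 1) / 2)) pl k := by
  have hnil : ∀ k : Nat, ¬ ((k : Int) < min (2 * (sl.length : Int) - 1) (pl.length : Int)) →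
      (List.flatMap (pvF sl pl) (PySem.List.pyRange (k : Int) (min (2 * (sl.length : Int) - 1) (pl.length : Int)) 1)).flatten
        = pvGo (sl.drop ((k + 1) / 2)) pl k := by
    intro k hklt
    have hr : PySem.List.pyRange (k : Int) (min (2 * (sl.length : Int) - 1) (pl.length : Int)) 1 = [] := by
      simp [PySem.List.pyRange]
      omega
    rw [hr, pvGo, dif_neg]
    · simp
    · rintro ⟨h1, h2⟩
      have : (k + 1) / 2 < sl.length := by
        by_contra hh
        exact h1 (List.drop_eq_nil_iff.mpr (by omega))
      omega
  induction n with
  | zero =>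
    intro k hk
    exact hnil k (by omega)
  | succ n ih =>
    intro k hk
    by_cases hklt : (k : Int) < min (2 * (sl.length : Int) - 1) (pl.length : Int)
    · have hkp : k < pl.length := by omega
      have hks : (k + 1) / 2 < sl.length := by omega
      rw [PySem.List.pyRange_one_cons hklt, List.flatMap_cons, List.flatten_append]
      rw [pvGo, dif_pos ⟨by intro h; have := List.drop_eq_nil_iff.mp h; omega, hkp⟩]
      have hcast : (k : Int) + 1 = ((k + 1 : Nat) : Int) := by push_cast; ring
      rw [hcast, ih (k + 1) (by omega)]
      have hpg : (((PySem.List.pyGet? pl (k : Int)).map ([·])).getD []) = [pl[k]'hkp] := by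
        rw [PySem.List.pyGet?_natCast, List.getElem?_eq_getElem hkp]
        rfl
      by_cases hk2 : k % 2 = 0
      · rw [if_pos hk2]
        have hdiv : (k + 1) / 2 = k / 2 := by omega
        have hdiv2 : k / 2 < sl.length := by omega
        have hh : (PySem.List.pyGet? (sl.map (fun c => pvModify (pvSumOrd [c]))) (PySem.Int.floordiv (k : Int) 2)).getD []
            = pvModify (pvSumOrd [sl[k / 2]'hdiv2]) := by
          rw [pvDiv2_eq, PySem.List.pyGet?_natCast]
          simp [List.getElem?_eq_getElem (by simpa using hdiv2 : k / 2 < (sl.map (fun c => pvModify (pvSumOrd [c]))).length)]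
        rw [pvF, if_pos (by rw [pvMod2_eq, hk2]; rfl), hh, hpg]
        simp only [List.head_drop, List.tail_drop, hdiv]
        have hdiv3 : k / 2 + 1 = (k + 1 + 1) / 2 := by omega
        rw [hdiv3]
        simp
      · rw [if_neg hk2]
        have hdiv : (k + 1 + 1) / 2 = (k + 1) / 2 := by omega
        rw [pvF, if_neg (by rw [pvMod2_eq]; omega), hpg, hdiv]
        simp
    · exact hnil k hklt

theorem final_lemma (s pwd : String) : insert_pwd s pwd = insert_pwd_alt s pwd := by
  unfold insert_pwd insert_pwd_alt
  have hfold : ∀ (r : List Int),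
      r.foldl (fun acc i =>
        (if PySem.Int.mod i 2 = 0 then
            acc ++ [(PySem.List.pyGet? (s.toList.map (fun c => pvModify (pvSumOrd [c]))) (PySem.Int.floordiv i 2)).getD []]
          else acc)
          ++ [(((PySem.List.pyGet? pwd.toList i).map ([·])).getD [])]) ([] : List (List Char))
      = r.flatMap (pvF s.toList pwd.toList) := by
    intro r
    have hstep : (fun (acc : List (List Char)) i =>
        (if PySem.Int.mod i 2 = 0 then
            acc ++ [(PySem.List.pyGet? (s.toList.map (fun c => pvModify (pvSumOrd [c]))) (PySem.Int.floordiv i 2)).getD []]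
          else acc)
          ++ [(((PySem.List.pyGet? pwd.toList i).map ([·])).getD [])])
        = fun acc i => acc ++ pvF s.toList pwd.toList i := by
      funext acc i
      rw [pvF]
      split <;> simp
    rw [hstep, PySem.List.foldl_append_eq_flatMap]
    rfl
  simp only [hfold]
  congr 1
  have hA := loopA_aux pwd.toList pwd.toList.length 0 s.toList [] (by omega)
  simp only [Nat.cast_zero] at hA
  rw [hA, List.nil_append]
  have hB := altB_aux s.toList pwd.toList pwd.toList.length 0 (by omega)
  simp only [Nat.cast_zero, Nat.zero_add, Nat.reduceDiv, List.drop_zero] at hB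
  exact hB.symm

-- ===== VERDICT (by name: the statement is the Claim_ definition above) =====
theorem insert_pwd_spec : Claim_equal_insert_pwd := by
  intro s pwd _
  unfold Spec_insert_pwd
  exact final_lemma s pwd
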